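-- pv_equiv track=rewrite | github.com/stassev/Go-Board-Fellow | backend_katago_weak.py | ensure_color_turn
-- ===== SOURCE A (Python) =====
-- def ensure_color_turn(moves, desired_color):
--     opposite_color = 'w' if desired_color == 'b' else 'b'
--     # Find all indices of moves with the opposite color
--     indices = [i for i, (c, _) in enumerate(moves) if c == opposite_color]
--     if not indices:
--         # No move of opposite color found; can't avoid dummies, but you asked to avoid them
--         return moves
--     last_idx = indices[-1]
--     # If the last move is not already the opposite color
--     if last_idx != len(moves) - 1:
--         move = moves.pop(last_idx)
--         moves.append(move)
--     return moves
-- ===== SOURCE B (Python) =====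
-- def ensure_color_turn(moves, desired_color):
--     opposite_color = 'w' if desired_color == 'b' else 'b'
--     # Single forward pass splitting moves into: out (prefix), saved (latest
--     # opposite-color move seen), after (moves following saved). Whenever a new
--     # opposite-color move arrives, the previous saved one and its trailing
--     # segment are flushed back into out, preserving their original order.
--     out, saved, after = [], None, []
--     for m in moves:
--         if m[0] == opposite_color:
--             if saved is not None:
--                 out.append(saved)
--                 out.extend(after)
--                 after = []
--             saved = m
--         else:
--             if saved is None:
--                 out.append(m)
--             else:
--                 after.append(m)
--     if saved is None or not after:
--         # no opposite-color move, or it is already last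
--         return moves
--     moves[:] = out + after + [saved]
--     return moves
-- ===== Notes on version B (the rewrite author's own statement) =====
-- stated objective: alternative
-- what changed: Replaces A's index bookkeeping (collect all matching indices, take the last, pop/append by index) with an index-free single forward pass that partitions the list into prefix/candidate/tail accumulators and rebuilds the result by concatenation.
import Mathlib
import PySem

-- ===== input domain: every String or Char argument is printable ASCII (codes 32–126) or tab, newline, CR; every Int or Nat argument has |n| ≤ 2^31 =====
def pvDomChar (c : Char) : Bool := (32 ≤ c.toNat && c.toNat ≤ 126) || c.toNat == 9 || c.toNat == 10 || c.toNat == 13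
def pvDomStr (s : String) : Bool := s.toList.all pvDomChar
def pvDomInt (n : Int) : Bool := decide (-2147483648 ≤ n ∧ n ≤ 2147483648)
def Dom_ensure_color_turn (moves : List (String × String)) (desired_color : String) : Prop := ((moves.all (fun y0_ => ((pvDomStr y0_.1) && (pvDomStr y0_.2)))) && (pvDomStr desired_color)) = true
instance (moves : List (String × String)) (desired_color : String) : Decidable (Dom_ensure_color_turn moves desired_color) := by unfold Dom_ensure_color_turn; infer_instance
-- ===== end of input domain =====

-- B replaces A's index bookkeeping (collect all indices, pop by index) with an index-free
-- single forward pass into prefix/candidate/tail accumulators (objective: alternative).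
-- A mutates `moves` in place (pop/append) and B via slice assignment; the equivalence
-- proved here is about the return value only (the mutation effect is the same).

-- ===== PORT A =====
def ensure_color_turn (moves : List (String × String)) (desired_color : String) : List (String × String) :=
  let opposite_color := if desired_color == "b" then "w" else "b"
  -- indices = [i for i, (c, _) in enumerate(moves) if c == opposite_color]
  let indices := ((PySem.List.enumerate moves 0).filter (fun p => p.2.1 == opposite_color)).map (·.1)
  if indices.isEmpty then
    moves
  else
    let last_idx := PySem.List.pyGetD indices (-1) 0   -- indices[-1], safe: indices nonempty
    if last_idx ≠ (moves.length : Int) - 1 then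
      match PySem.List.pop? moves last_idx with        -- moves.pop(last_idx); moves.append(move)
      | some (move, rest) => rest ++ [move]
      | none => moves                                  -- unreachable: last_idx is a valid index
    else moves

-- ===== PORT B =====
-- B's loop body: state is (out, saved, after).
def pvStep (opp : String) (st : List (String × String) × Option (String × String) × List (String × String))
    (m : String × String) : List (String × String) × Option (String × String) × List (String × String) :=
  if m.1 == opp then
    match st.2.1 with
    | some s => (st.1 ++ s :: st.2.2, some m, [])
    | none => (st.1, some m, [])
  else
    match st.2.1 with
    | some _ => (st.1, st.2.1, st.2.2 ++ [m])
    | none => (st.1 ++ [m], none, st.2.2)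

def ensure_color_turn_alt (moves : List (String × String)) (desired_color : String) : List (String × String) :=
  let opposite_color := if desired_color == "b" then "w" else "b"
  let st := moves.foldl (pvStep opposite_color) ([], none, [])
  match st.2.1 with
  | none => moves                                      -- saved is None
  | some s => if st.2.2.isEmpty then moves             -- not after: already last
              else st.1 ++ st.2.2 ++ [s]               -- moves[:] = out + after + [saved]

-- ===== PRECONDITION & SPEC =====
def Spec_ensure_color_turn (moves : List (String × String)) (desired_color : String) (out : List (String × String)) : Prop := out = ensure_color_turn_alt moves desired_color
instance (moves : List (String × String)) (desired_color : String) (out : List (String × String)) : Decidable (Spec_ensure_color_turn moves desired_color out) := by unfold Spec_ensure_color_turn; infer_instance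

-- ===== CLAIM =====
def Claim_equal_ensure_color_turn : Prop := ∀ (moves : List (String × String)) (desired_color : String), Dom_ensure_color_turn moves desired_color → Spec_ensure_color_turn moves desired_color (ensure_color_turn moves desired_color)

-- ===== LEMMAS AND PROOFS =====

-- Proof device: A's "last opposite index" as a reverse scan over the reversed list.
def pvRevScan (l : List (String × String)) (opp : String) : Option Nat :=
  match l with
  | [] => none
  | (c, _) :: t => if c == opp then some t.length else pvRevScan t opp

-- A's last matching index (as an Int, enumeration starting at s) equals the reverse scan result.
theorem pv_last_eq_revScan (l : List (String × String)) (opp : String) (s : Int) :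
    (((PySem.List.enumerate l s).filter (fun p => p.2.1 == opp)).map (·.1)).getLast?
      = (pvRevScan l.reverse opp).map (fun n => s + (n : Int)) := by
  induction l using List.reverseRecOn generalizing s with
  | nil => simp [pvRevScan]
  | append_singleton l a ih =>
    obtain ⟨c, m⟩ := a
    simp only [PySem.List.enumerate_append, List.filter_append, List.map_append,
      List.reverse_append, List.reverse_cons, List.reverse_nil, List.nil_append,
      List.cons_append, pvRevScan, List.length_reverse]
    by_cases h : c == opp
    · simp [PySem.List.enumerate, h]
    · simp [PySem.List.enumerate, h, ih]

theorem pv_revScan_skip (xs rest : List (String × String)) (opp : String)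
    (h : ∀ p ∈ xs, ¬ (p.1 == opp)) : pvRevScan (xs ++ rest) opp = pvRevScan rest opp := by
  induction xs with
  | nil => rfl
  | cons a t ih =>
    obtain ⟨c, m⟩ := a
    have hc : ¬ (c == opp) := h (c, m) (List.mem_cons_self ..)
    simp only [List.cons_append, pvRevScan, if_neg hc]
    exact ih (fun p hp => h p (List.mem_cons_of_mem _ hp))

-- Invariant of B's fold.
theorem pv_fold_inv (l : List (String × String)) (opp : String) :
    (let st := l.foldl (pvStep opp) ([], none, [])
     (st.2.1 = none ∧ st.1 = l ∧ st.2.2 = [] ∧ ∀ p ∈ l, ¬ (p.1 == opp)) ∨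
     (∃ s, st.2.1 = some s ∧ (s.1 == opp) ∧ l = st.1 ++ s :: st.2.2 ∧
        ∀ p ∈ st.2.2, ¬ (p.1 == opp))) := by
  induction l using List.reverseRecOn with
  | nil => left; simp
  | append_singleton l a ih =>
    simp only [List.foldl_append, List.foldl_cons, List.foldl_nil] at *
    set st := l.foldl (pvStep opp) ([], none, []) with hst
    by_cases ha : a.1 == opp
    · right
      rcases ih with ⟨h1, h2, h3, h4⟩ | ⟨s, h1, h2, h3, h4⟩
      · exact ⟨a, by simp [pvStep, ha, h1, h2], ha, by simp [pvStep, ha, h1, h2], by simp [pvStep, ha, h1]⟩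
      · refine ⟨a, by simp [pvStep, ha, h1], ha, ?_, by simp [pvStep, ha, h1]⟩
        simp [pvStep, ha, h1, h3]
    · rcases ih with ⟨h1, h2, h3, h4⟩ | ⟨s, h1, h2, h3, h4⟩
      · left
        refine ⟨by simp [pvStep, ha, h1], by simp [pvStep, ha, h1, h2], by simp [pvStep, ha, h1, h3], ?_⟩
        intro p hp
        rcases List.mem_append.1 hp with hp | hp
        · exact h4 p hp
        · simp at hp; subst hp; exact ha
      · right
        refine ⟨s, by simp [pvStep, ha, h1], h2, by simp [pvStep, ha, h1]; rw [h3]; simp, ?_⟩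
        intro p hp
        simp only [pvStep, if_neg ha, h1] at hp
        rcases List.mem_append.1 hp with hp | hp
        · exact h4 p hp
        · simp at hp; subst hp; exact ha

theorem ensure_color_turn_eq (moves : List (String × String)) (desired_color : String) :
    ensure_color_turn moves desired_color = ensure_color_turn_alt moves desired_color := by
  simp only [ensure_color_turn, ensure_color_turn_alt]
  set opp := if desired_color == "b" then "w" else "b" with hopp
  have hkey := pv_last_eq_revScan moves opp 0
  have hinv := pv_fold_inv moves opp
  set st := moves.foldl (pvStep opp) ([], none, []) with hst
  rcases hinv with ⟨h1, h2, h3, h4⟩ | ⟨s, h1, h2, h3, h4⟩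
  · -- no opposite move: both return moves
    have hscan : pvRevScan moves.reverse opp = none := by
      have := pv_revScan_skip moves.reverse [] opp (by
        intro p hp; exact h4 p (List.mem_reverse.1 hp))
      simpa using this
    rw [hscan] at hkey
    have hkey2 : (((PySem.List.enumerate moves 0).filter (fun p => p.2.1 == opp)).map (·.1)) = [] := by
      rw [← List.getLast?_eq_none_iff]; exact hkey
    simp [hkey2, h1]
  · -- last opposite move s at index st.1.length
    have hscan : pvRevScan moves.reverse opp = some st.1.length := by
      rw [h3]
      simp only [List.reverse_append, List.reverse_cons, List.append_assoc]
      rw [pv_revScan_skip _ _ opp (by intro p hp; exact h4 p (List.mem_reverse.1 hp))]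
      obtain ⟨c, m⟩ := s
      simp only [List.cons_append, List.nil_append, pvRevScan, if_pos h2, List.length_reverse]
    rw [hscan] at hkey
    set I := ((PySem.List.enumerate moves 0).filter (fun p => p.2.1 == opp)).map (·.1) with hI
    have hkey2 : I.getLast? = some (st.1.length : Int) := by
      rw [hkey]; simp
    have hne : I ≠ [] := by intro h; rw [h] at hkey2; simp at hkey2
    have hlast : PySem.List.pyGetD I (-1) 0 = (st.1.length : Int) := by
      rw [PySem.List.pyGetD_neg_one I 0 hne]
      have h1' : I.getLast? = some (I.getLast hne) := List.getLast?_eq_some_getLast hne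
      exact Option.some.inj (h1'.symm.trans hkey2)
    have hlen : moves.length = st.1.length + st.2.2.length + 1 := by rw [h3]; simp; omega
    have hlt : st.1.length < moves.length := by omega
    have hpop : PySem.List.pop? moves (st.1.length : Int) = some (moves[st.1.length], moves.eraseIdx st.1.length) :=
      PySem.List.pop?_natCast moves st.1.length hlt
    have hget : moves[st.1.length]'hlt = s := by
      have h' : moves[st.1.length]? = some s := by
        rw [h3, List.getElem?_append_right (Nat.le_refl _)]; simp
      simpa [List.getElem?_eq_getElem hlt] using h'
    have herase : moves.eraseIdx st.1.length = st.1 ++ st.2.2 := by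
      rw [h3, List.eraseIdx_append_of_length_le (Nat.le_refl _)]
      simp
    simp only [List.isEmpty_iff, hne]
    rw [hlast, h1]
    by_cases hafter : st.2.2 = []
    · have : (st.1.length : Int) = (moves.length : Int) - 1 := by
        rw [hlen, hafter]; simp
      simp [this, hafter]
    · have hne2 : (st.1.length : Int) ≠ (moves.length : Int) - 1 := by
        have : st.2.2.length ≠ 0 := by simpa [List.length_eq_zero_iff] using hafter
        omega
      rw [if_pos hne2, hpop]
      simp [hget, herase, hafter]

-- ===== VERDICT =====
theorem ensure_color_turn_spec : Claim_equal_ensure_color_turn := by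
  intro moves desired_color _
  unfold Spec_ensure_color_turn
  exact ensure_color_turn_eq moves desired_color
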